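-- pv_equiv track=rewrite | github.com/DetegiCE/baekjoon-ps | 31000s/31430.py | n2s
-- ===== SOURCE A (Python) =====
-- def n2s(num):
--     t = 'abcdefghijklmnopqrstuvwxyz'
--     l = []
--     while num > 0:
--         l.append(num % 26)
--         num //= 26
--     while len(l) < 13:
--         l.append(0)
--     l.reverse()
--     s = ''
--     for i in l:
--         s += t[i]
--     return s
-- ===== SOURCE B (Python) =====
-- def n2s(num):
--     t = 'abcdefghijklmnopqrstuvwxyz'
--     if num <= 0:
--         return t[0] * 13
--     L, m = 0, num
--     while m > 0:
--         m //= 26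
--         L += 1
--     L = max(L, 13)
--     digits = [(num // 26 ** i) % 26 for i in range(L)]
--     return ''.join(t[d] for d in reversed(digits))
-- ===== Notes on version B (the rewrite author's own statement) =====
-- stated objective: alternative
-- what changed: B returns the all-'a' string directly for num<=0 and otherwise first counts the number of base-26 digits, then computes each digit independently by a closed-form positional formula (num // 26**i) % 26 via a list comprehension, replacing A's destructive divide-accumulate loop, padding loop, in-place reverse and string-concatenation loop.
import Mathlib
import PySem

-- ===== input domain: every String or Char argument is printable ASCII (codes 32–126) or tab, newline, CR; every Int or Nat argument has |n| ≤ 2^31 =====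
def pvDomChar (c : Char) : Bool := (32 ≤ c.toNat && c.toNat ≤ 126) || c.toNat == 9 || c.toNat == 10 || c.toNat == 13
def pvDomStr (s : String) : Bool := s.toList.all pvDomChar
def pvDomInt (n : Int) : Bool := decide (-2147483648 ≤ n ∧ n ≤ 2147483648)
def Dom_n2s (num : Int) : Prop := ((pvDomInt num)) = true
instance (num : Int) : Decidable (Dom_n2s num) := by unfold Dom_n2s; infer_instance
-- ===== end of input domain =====

-- B replaces A's divide-accumulate/pad/reverse/concat loops by a digit count plus a closed-form
-- positional digit formula (alternative decomposition, same cost).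


-- ===== PORT A =====
-- 'while num > 0: l.append(num % 26); num //= 26'
def n2sLoopA (num : Int) (l : List Int) : List Int :=
  if h : 0 < num then
    n2sLoopA (PySem.Int.floordiv num 26) (l ++ [PySem.Int.mod num 26])
  else l
termination_by num.toNat
decreasing_by
  all_goals
    have h1 : num / 26 < num := by
      rw [Int.ediv_lt_iff_lt_mul (by omega)]
      nlinarith
    have h26 : PySem.Int.floordiv num 26 = num / 26 :=
      PySem.Int.floordiv_eq_ediv_of_pos (by omega)
    omega

-- 'while len(l) < 13: l.append(0)'
def n2sPad (l : List Int) : List Int :=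
  if l.length < 13 then n2sPad (l ++ [0]) else l
termination_by 13 - l.length
decreasing_by simp; omega

-- 's = ""; for i in l: s += t[i]'  (chars accumulated as a List Char, packed at the end)
def n2s (num : Int) : String :=
  let t := "abcdefghijklmnopqrstuvwxyz".toList
  let l := (n2sPad (n2sLoopA num [])).reverse
  String.ofList (l.foldl (fun s i => s ++ (PySem.List.pyGet? t i).toList) [])

-- ===== PORT B =====
-- 'while m > 0: m //= 26; L += 1'
def n2sCount (m : Int) : Nat :=
  if h : 0 < m then n2sCount (PySem.Int.floordiv m 26) + 1 else 0
termination_by m.toNat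
decreasing_by
  all_goals
    have h1 : m / 26 < m := by
      rw [Int.ediv_lt_iff_lt_mul (by omega)]
      nlinarith
    have h26 : PySem.Int.floordiv m 26 = m / 26 :=
      PySem.Int.floordiv_eq_ediv_of_pos (by omega)
    omega

def n2s_alt (num : Int) : String :=
  let t := "abcdefghijklmnopqrstuvwxyz".toList
  if num ≤ 0 then
    -- 'return t[0] * 13'
    String.ofList ((List.replicate 13 (PySem.List.pyGet? t 0).toList).flatten)
  else
    let L := max (n2sCount num) 13
    -- '[(num // 26 ** i) % 26 for i in range(L)]' (i ranges over 0..L-1, so the Nat exponent is exact)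
    let digits := (List.range L).map
      (fun i => PySem.Int.mod (PySem.Int.floordiv num ((26:Int) ^ i)) 26)
    -- "''.join(t[d] for d in reversed(digits))"
    String.ofList ((digits.reverse.map (fun d => (PySem.List.pyGet? t d).toList)).flatten)

-- ===== PRECONDITION & SPEC =====
def Spec_n2s (num : Int) (out : String) : Prop := out = n2s_alt num
instance (num : Int) (out : String) : Decidable (Spec_n2s num out) := by unfold Spec_n2s; infer_instance

-- ===== CLAIM (what is proved, stated in full; the proofs are below) =====
def Claim_equal_n2s : Prop := ∀ (num : Int), Dom_n2s num → Spec_n2s num (n2s num)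

-- ===== LEMMAS AND PROOFS =====

theorem n2sLoopA_acc (num : Int) (l : List Int) :
    n2sLoopA num l = l ++ n2sLoopA num [] := by
  by_cases h : 0 < num
  · conv_lhs => rw [n2sLoopA]
    conv_rhs => rw [n2sLoopA]
    simp only [h, dite_true]
    rw [n2sLoopA_acc (PySem.Int.floordiv num 26) (l ++ [PySem.Int.mod num 26]),
        n2sLoopA_acc (PySem.Int.floordiv num 26) ([] ++ [PySem.Int.mod num 26])]
    simp
  · conv_lhs => rw [n2sLoopA]
    conv_rhs => rw [n2sLoopA]
    simp [h]
termination_by num.toNat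
decreasing_by
  all_goals
    have h1 : num / 26 < num := by
      rw [Int.ediv_lt_iff_lt_mul (by omega)]
      nlinarith
    have h26 : PySem.Int.floordiv num 26 = num / 26 :=
      PySem.Int.floordiv_eq_ediv_of_pos (by omega)
    omega

theorem n2sPad_eq (l : List Int) :
    n2sPad l = l ++ List.replicate (13 - l.length) 0 := by
  by_cases h : l.length < 13
  · rw [n2sPad]
    simp only [h, if_true]
    rw [n2sPad_eq (l ++ [0])]
    have h13 : 13 - l.length = (13 - (l ++ [0]).length) + 1 := by simp; omega
    rw [h13, List.replicate_succ]
    simp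
  · rw [n2sPad]
    have h0 : 13 - l.length = 0 := by omega
    simp [h, h0]
termination_by 13 - l.length
decreasing_by simp; omega

theorem floordiv_floordiv (a : Int) (i : Nat) :
    PySem.Int.floordiv (PySem.Int.floordiv a 26) ((26:Int) ^ i)
      = PySem.Int.floordiv a ((26:Int) ^ (i + 1)) := by
  have hp : (0:Int) < (26:Int) ^ i := by positivity
  rw [PySem.Int.floordiv_eq_ediv_of_pos (by omega : (0:Int) < 26),
      PySem.Int.floordiv_eq_ediv_of_pos hp,
      PySem.Int.floordiv_eq_ediv_of_pos (by positivity)]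
  rw [Int.ediv_ediv_of_nonneg (by omega : (0:Int) ≤ 26), pow_succ, mul_comm]

theorem n2sLoopA_eq_digits (num : Int) :
    n2sLoopA num [] = (List.range (n2sCount num)).map
      (fun i => PySem.Int.mod (PySem.Int.floordiv num ((26:Int) ^ i)) 26) := by
  by_cases h : 0 < num
  · rw [n2sLoopA, n2sCount]
    simp only [h, dite_true]
    rw [n2sLoopA_acc, n2sLoopA_eq_digits (PySem.Int.floordiv num 26),
        List.range_succ_eq_map]
    simp only [List.nil_append, List.singleton_append]
    congr 1
    · have h0 : PySem.Int.floordiv num ((26:Int) ^ 0) = num := by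
        rw [PySem.Int.floordiv_eq_ediv_of_pos (by norm_num)]; simp
      simp
    · rw [List.map_map]
      apply List.map_congr_left
      intro i _
      simp only [Function.comp_apply, Nat.succ_eq_add_one]
      rw [floordiv_floordiv]
  · rw [n2sLoopA, n2sCount]
    simp [h]
termination_by num.toNat
decreasing_by
  all_goals
    have h1 : num / 26 < num := by
      rw [Int.ediv_lt_iff_lt_mul (by omega)]
      nlinarith
    have h26 : PySem.Int.floordiv num 26 = num / 26 :=
      PySem.Int.floordiv_eq_ediv_of_pos (by omega)
    omega

theorem lt_pow_count (num : Int) : num < (26:Int) ^ (n2sCount num) := by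
  by_cases h : 0 < num
  · rw [n2sCount]
    simp only [h, dite_true]
    have hfd : PySem.Int.floordiv num 26 = num / 26 :=
      PySem.Int.floordiv_eq_ediv_of_pos (by omega)
    have hdm := Int.mul_ediv_add_emod num 26
    have hm : num % 26 < 26 := Int.emod_lt_of_pos num (by omega)
    have hq : num / 26 < (26:Int) ^ (n2sCount (PySem.Int.floordiv num 26)) := by
      rw [← hfd]; exact lt_pow_count (PySem.Int.floordiv num 26)
    calc num = 26 * (num / 26) + num % 26 := hdm.symm
      _ < 26 * (26 ^ (n2sCount (PySem.Int.floordiv num 26))) := by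
          have h2 : num / 26 + 1 ≤ 26 ^ (n2sCount (PySem.Int.floordiv num 26)) := hq
          nlinarith
      _ = 26 ^ (n2sCount (PySem.Int.floordiv num 26) + 1) := by ring
  · rw [n2sCount]
    simp only [h, dite_false]
    simpa using show num < 1 by omega
termination_by num.toNat
decreasing_by
  all_goals
    have h1 : num / 26 < num := by
      rw [Int.ediv_lt_iff_lt_mul (by omega)]
      nlinarith
    have h26 : PySem.Int.floordiv num 26 = num / 26 :=
      PySem.Int.floordiv_eq_ediv_of_pos (by omega)
    omega

theorem digit_zero_of_ge (num : Int) (hnum : 0 ≤ num) (i : Nat)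
    (hi : n2sCount num ≤ i) :
    PySem.Int.mod (PySem.Int.floordiv num ((26:Int) ^ i)) 26 = 0 := by
  have hp : (0:Int) < (26:Int) ^ i := by positivity
  have hlt : num < (26:Int) ^ i := by
    calc num < (26:Int) ^ (n2sCount num) := lt_pow_count num
      _ ≤ (26:Int) ^ i := pow_le_pow_right₀ (by omega) hi
  rw [PySem.Int.floordiv_eq_ediv_of_pos hp]
  rw [Int.ediv_eq_zero_of_lt hnum hlt]
  rw [PySem.Int.mod_eq_emod_of_pos (by omega)]
  simp

theorem foldl_append_char (l : List Int) (f : Int → List Char) (init : List Char) :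
    l.foldl (fun s i => s ++ f i) init = init ++ (l.map f).flatten := by
  induction l generalizing init with
  | nil => simp
  | cons x xs ih => simp [List.foldl_cons, ih]

-- ===== VERDICT (by name: the statement is the Claim_ definition above) =====
theorem n2s_spec : Claim_equal_n2s := by
  intro num _
  unfold Spec_n2s n2s n2s_alt
  simp only []
  set t := "abcdefghijklmnopqrstuvwxyz".toList with ht
  rw [foldl_append_char]
  simp only [List.nil_append]
  by_cases hle : num ≤ 0
  · -- num ≤ 0: loop produced nothing, pad gives 13 zeros
    have hloop : n2sLoopA num [] = [] := by rw [n2sLoopA]; simp [show ¬ 0 < num by omega]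
    rw [if_pos hle, hloop, n2sPad_eq]
    simp
  · rw [if_neg hle]
    have hpos : 0 < num := by omega
    set n := n2sCount num with hn
    set dig := fun i : Nat => PySem.Int.mod (PySem.Int.floordiv num ((26:Int) ^ i)) 26 with hdig
    have hdigits : n2sLoopA num [] = (List.range n).map dig := n2sLoopA_eq_digits num
    set L := max n 13 with hL
    have hnL : n ≤ L := le_max_left _ _
    have hsplit : List.range L = List.range n ++ (List.range (L - n)).map (n + ·) := by
      rw [← List.range_add]; congr 1; omega
    have hzeros : (List.range (L - n)).map (fun k => dig (n + k)) =
        List.replicate (L - n) 0 := by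
      rw [List.eq_replicate_iff]
      refine ⟨by simp, ?_⟩
      intro b hb
      simp only [List.mem_map, List.mem_range] at hb
      obtain ⟨k, _, hk⟩ := hb
      rw [← hk, hdig]
      exact digit_zero_of_ge num (by omega) (n + k) (by omega)
    have key : ((List.range L).map dig).reverse
        = List.replicate (L - n) 0 ++ ((List.range n).map dig).reverse := by
      rw [hsplit, List.map_append, List.reverse_append, List.map_map]
      congr 1
      have hc : dig ∘ (fun x => n + x) = fun k => dig (n + k) := rfl
      rw [hc, hzeros, List.reverse_replicate]
    have hLn : L - n = 13 - ((List.range n).map dig).length := by simp; omega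
    rw [n2sPad_eq, hdigits, ← hLn, key, List.reverse_append, List.reverse_replicate]
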